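-- pv_equiv track=rewrite | github.com/TakaIshikawa/blueprint | src/blueprint/task_permission_migration_readiness.py | _required_safeguards
-- ===== SOURCE A (Python) =====
-- from typing import Any, Iterable, Literal, Mapping, TypeVar
--
-- PermissionMigrationVector = Literal[
--     "role_model_change",
--     "permission_backfill",
--     "scope_change",
--     "entitlement_sync",
--     "policy_rewrite",
--     "group_mapping",
--     "admin_override",
-- ]
--
-- PermissionMigrationSafeguard = Literal[
--     "compatibility_mapping",
--     "migration_backfill",
--     "audit_events",
--     "rollback_plan",
--     "access_review",
--     "test_fixtures",
--     "customer_communication",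
-- ]
--
-- _SAFEGUARD_ORDER: tuple[PermissionMigrationSafeguard, ...] = (
--     "compatibility_mapping",
--     "migration_backfill",
--     "audit_events",
--     "rollback_plan",
--     "access_review",
--     "test_fixtures",
--     "customer_communication",
-- )
--
-- def _required_safeguards(
--     vectors: tuple[PermissionMigrationVector, ...],
-- ) -> tuple[PermissionMigrationSafeguard, ...]:
--     required: set[PermissionMigrationSafeguard] = {
--         "compatibility_mapping",
--         "audit_events",
--         "rollback_plan",
--         "access_review",
--         "test_fixtures",
--     }
--     if set(vectors) & {
--         "role_model_change",
--         "permission_backfill",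
--         "scope_change",
--         "entitlement_sync",
--         "policy_rewrite",
--         "group_mapping",
--     }:
--         required.add("migration_backfill")
--     if set(vectors) & {"role_model_change", "scope_change", "entitlement_sync", "policy_rewrite", "group_mapping"}:
--         required.add("customer_communication")
--     return tuple(safeguard for safeguard in _SAFEGUARD_ORDER if safeguard in required)
-- ===== SOURCE B (Python) =====
-- _SAFEGUARD_ORDER = (
--     "compatibility_mapping",
--     "migration_backfill",
--     "audit_events",
--     "rollback_plan",
--     "access_review",
--     "test_fixtures",
--     "customer_communication",
-- )
--
-- _BASE = frozenset({
--     "compatibility_mapping",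
--     "audit_events",
--     "rollback_plan",
--     "access_review",
--     "test_fixtures",
-- })
--
-- _EXTRA = {
--     "role_model_change": frozenset({"migration_backfill", "customer_communication"}),
--     "scope_change": frozenset({"migration_backfill", "customer_communication"}),
--     "entitlement_sync": frozenset({"migration_backfill", "customer_communication"}),
--     "policy_rewrite": frozenset({"migration_backfill", "customer_communication"}),
--     "group_mapping": frozenset({"migration_backfill", "customer_communication"}),
--     "permission_backfill": frozenset({"migration_backfill"}),
-- }
--
-- def _required_safeguards(vectors):
--     required = set(_BASE)
--     for vector in vectors:
--         required |= _EXTRA.get(vector, frozenset())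
--     return tuple(s for s in _SAFEGUARD_ORDER if s in required)
-- ===== Notes on version B (the rewrite author's own statement) =====
-- stated objective: idiomatic
-- what changed: Replaces A's two whole-set intersection tests against hard-coded vector sets by a vector-to-safeguards lookup table folded over the input, unioning each vector's triggered safeguards into the base set.
import Mathlib
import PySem

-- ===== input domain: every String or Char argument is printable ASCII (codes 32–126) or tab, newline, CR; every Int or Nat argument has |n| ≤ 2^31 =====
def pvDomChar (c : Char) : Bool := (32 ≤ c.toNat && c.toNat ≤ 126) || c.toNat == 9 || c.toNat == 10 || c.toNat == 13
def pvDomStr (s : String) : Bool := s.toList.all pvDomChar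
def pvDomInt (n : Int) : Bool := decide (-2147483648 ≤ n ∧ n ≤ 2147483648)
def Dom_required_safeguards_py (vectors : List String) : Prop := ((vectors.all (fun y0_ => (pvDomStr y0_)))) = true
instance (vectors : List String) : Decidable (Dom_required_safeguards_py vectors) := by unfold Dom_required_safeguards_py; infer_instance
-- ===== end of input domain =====

-- B replaces A's two whole-set intersection tests by a per-vector table lookup folded into the
-- required set (objective: idiomatic; same O(n) cost).

-- ===== PORT A =====
def pvSafeguardOrder : List String :=
  ["compatibility_mapping", "migration_backfill", "audit_events", "rollback_plan",
   "access_review", "test_fixtures", "customer_communication"]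

def required_safeguards_py (vectors : List String) : List String :=
  -- required = {five base safeguards}
  let required : PySem.Set String := PySem.Set.ofList
    ["compatibility_mapping", "audit_events", "rollback_plan", "access_review", "test_fixtures"]
  -- if set(vectors) & {six vectors}: required.add("migration_backfill")
  let required :=
    if !(PySem.Set.inter (PySem.Set.ofList vectors)
          (PySem.Set.ofList ["role_model_change", "permission_backfill", "scope_change",
                             "entitlement_sync", "policy_rewrite", "group_mapping"])).isEmpty
    then PySem.Set.add required "migration_backfill" else required
  -- if set(vectors) & {five vectors}: required.add("customer_communication")
  let required :=
    if !(PySem.Set.inter (PySem.Set.ofList vectors)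
          (PySem.Set.ofList ["role_model_change", "scope_change", "entitlement_sync",
                             "policy_rewrite", "group_mapping"])).isEmpty
    then PySem.Set.add required "customer_communication" else required
  pvSafeguardOrder.filter (fun s => PySem.Set.contains required s)

-- ===== PORT B =====
-- _EXTRA.get(vector, frozenset())
def pvExtraTable : PySem.Dict String (List String) :=
  PySem.Dict.ofList [("role_model_change", ["migration_backfill", "customer_communication"]),
   ("scope_change", ["migration_backfill", "customer_communication"]),
   ("entitlement_sync", ["migration_backfill", "customer_communication"]),
   ("policy_rewrite", ["migration_backfill", "customer_communication"]),
   ("group_mapping", ["migration_backfill", "customer_communication"]),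
   ("permission_backfill", ["migration_backfill"])]

def required_safeguards_py_alt (vectors : List String) : List String :=
  let required : PySem.Set String := PySem.Set.ofList
    ["compatibility_mapping", "audit_events", "rollback_plan", "access_review", "test_fixtures"]
  let required := vectors.foldl
    (fun acc v => PySem.Set.union acc (PySem.Set.ofList (PySem.Dict.getD pvExtraTable v [])))
    required
  pvSafeguardOrder.filter (fun s => PySem.Set.contains required s)

-- ===== PRECONDITION & SPEC =====
def Spec_required_safeguards_py (vectors : List String) (out : List String) : Prop := out = required_safeguards_py_alt vectors
instance (vectors : List String) (out : List String) : Decidable (Spec_required_safeguards_py vectors out) := by unfold Spec_required_safeguards_py; infer_instance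

-- ===== CLAIM (what is proved, stated in full; the proofs are below) =====
def Claim_equal_required_safeguards_py : Prop := ∀ (vectors : List String), Dom_required_safeguards_py vectors → Spec_required_safeguards_py vectors (required_safeguards_py vectors)

-- ===== LEMMAS AND PROOFS =====

-- membership in B's folded union: in the seed or contributed by some vector's table entry
theorem mem_foldl_union {s : String} (init : PySem.Set String) (vectors : List String) :
    s ∈ vectors.foldl
        (fun acc v => PySem.Set.union acc (PySem.Set.ofList (PySem.Dict.getD pvExtraTable v [])))
        init
      ↔ s ∈ init ∨ ∃ v ∈ vectors, s ∈ PySem.Dict.getD pvExtraTable v [] := by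
  induction vectors generalizing init with
  | nil => simp
  | cons v vs ih =>
      simp [List.foldl_cons, ih, PySem.Set.mem_union, PySem.Set.mem_ofList, or_assoc]

-- A's truthiness test "set(vectors) & ys" as an existential
theorem inter_nonempty_iff (vectors ys : List String) :
    (!(PySem.Set.inter (PySem.Set.ofList vectors) (PySem.Set.ofList ys)).isEmpty) = true
      ↔ ∃ v ∈ vectors, v ∈ ys := by
  rw [Bool.not_eq_eq_eq_not, Bool.not_true, List.isEmpty_eq_false_iff_exists_mem]
  constructor
  · rintro ⟨v, hv⟩
    have := (PySem.Set.mem_inter (PySem.Set.ofList vectors) (PySem.Set.ofList ys) v).mp hv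
    exact ⟨v, (PySem.Set.mem_ofList _ _).mp this.1, (PySem.Set.mem_ofList _ _).mp this.2⟩
  · rintro ⟨v, h1, h2⟩
    exact ⟨v, (PySem.Set.mem_inter _ _ _).mpr
      ⟨(PySem.Set.mem_ofList _ _).mpr h1, (PySem.Set.mem_ofList _ _).mpr h2⟩⟩

-- what the table contributes: "migration_backfill" iff the vector is one of the six,
-- "customer_communication" iff one of the five, nothing else ever
theorem mem_extra_iff (v s : String) :
    s ∈ PySem.Dict.getD pvExtraTable v []
      ↔ (s = "migration_backfill" ∧
            v ∈ ["role_model_change", "permission_backfill", "scope_change",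
                 "entitlement_sync", "policy_rewrite", "group_mapping"]) ∨
        (s = "customer_communication" ∧
            v ∈ ["role_model_change", "scope_change", "entitlement_sync",
                 "policy_rewrite", "group_mapping"]) := by
  by_cases h1 : v = "role_model_change"
  · subst h1
    rw [show pvExtraTable.getD "role_model_change" [] =
        ["migration_backfill", "customer_communication"] from rfl]
    simp
  by_cases h2 : v = "scope_change"
  · subst h2
    rw [show pvExtraTable.getD "scope_change" [] =
        ["migration_backfill", "customer_communication"] from rfl]
    simp
  by_cases h3 : v = "entitlement_sync"
  · subst h3
    rw [show pvExtraTable.getD "entitlement_sync" [] =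
        ["migration_backfill", "customer_communication"] from rfl]
    simp
  by_cases h4 : v = "policy_rewrite"
  · subst h4
    rw [show pvExtraTable.getD "policy_rewrite" [] =
        ["migration_backfill", "customer_communication"] from rfl]
    simp
  by_cases h5 : v = "group_mapping"
  · subst h5
    rw [show pvExtraTable.getD "group_mapping" [] =
        ["migration_backfill", "customer_communication"] from rfl]
    simp
  by_cases h6 : v = "permission_backfill"
  · subst h6
    rw [show pvExtraTable.getD "permission_backfill" [] = ["migration_backfill"] from rfl]
    simp
  have hnone : pvExtraTable.getD v [] = [] := by
    have hitems : pvExtraTable.items =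
        [("role_model_change", ["migration_backfill", "customer_communication"]),
         ("scope_change", ["migration_backfill", "customer_communication"]),
         ("entitlement_sync", ["migration_backfill", "customer_communication"]),
         ("policy_rewrite", ["migration_backfill", "customer_communication"]),
         ("group_mapping", ["migration_backfill", "customer_communication"]),
         ("permission_backfill", ["migration_backfill"])] := rfl
    have c1 : ("role_model_change" == v) = false := beq_eq_false_iff_ne.mpr (Ne.symm h1)
    have c2 : ("scope_change" == v) = false := beq_eq_false_iff_ne.mpr (Ne.symm h2)
    have c3 : ("entitlement_sync" == v) = false := beq_eq_false_iff_ne.mpr (Ne.symm h3)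
    have c4 : ("policy_rewrite" == v) = false := beq_eq_false_iff_ne.mpr (Ne.symm h4)
    have c5 : ("group_mapping" == v) = false := beq_eq_false_iff_ne.mpr (Ne.symm h5)
    have c6 : ("permission_backfill" == v) = false := beq_eq_false_iff_ne.mpr (Ne.symm h6)
    simp only [PySem.Dict.getD, PySem.Dict.get?, hitems]
    simp [List.find?, c1, c2, c3, c4, c5, c6]
  simp [hnone, h1, h2, h3, h4, h5, h6]

-- ===== VERDICT (by name: the statement is the Claim_ definition above) =====
theorem required_safeguards_py_spec : Claim_equal_required_safeguards_py := by
  intro vectors _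
  show _ = _
  unfold required_safeguards_py required_safeguards_py_alt
  apply List.filter_congr
  intro s _
  rw [Bool.eq_iff_iff, PySem.Set.contains_iff, PySem.Set.contains_iff, mem_foldl_union]
  have key : (∃ v ∈ vectors, s ∈ pvExtraTable.getD v []) ↔
      (s = "migration_backfill" ∧ ∃ v ∈ vectors,
          v ∈ ["role_model_change", "permission_backfill", "scope_change",
               "entitlement_sync", "policy_rewrite", "group_mapping"]) ∨
      (s = "customer_communication" ∧ ∃ v ∈ vectors,
          v ∈ ["role_model_change", "scope_change", "entitlement_sync",
               "policy_rewrite", "group_mapping"]) := by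
    simp only [mem_extra_iff]
    constructor
    · rintro ⟨v, hv, ⟨h, hm⟩ | ⟨h, hm⟩⟩
      · exact Or.inl ⟨h, v, hv, hm⟩
      · exact Or.inr ⟨h, v, hv, hm⟩
    · rintro (⟨h, v, hv, hm⟩ | ⟨h, v, hv, hm⟩)
      · exact ⟨v, hv, Or.inl ⟨h, hm⟩⟩
      · exact ⟨v, hv, Or.inr ⟨h, hm⟩⟩
  rw [key]
  by_cases hb1 : ∃ v ∈ vectors,
      v ∈ ["role_model_change", "permission_backfill", "scope_change",
           "entitlement_sync", "policy_rewrite", "group_mapping"] <;>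
  by_cases hb2 : ∃ v ∈ vectors,
      v ∈ ["role_model_change", "scope_change", "entitlement_sync",
           "policy_rewrite", "group_mapping"]
  · rw [if_pos ((inter_nonempty_iff _ _).mpr hb2), if_pos ((inter_nonempty_iff _ _).mpr hb1)]
    simp only [hb1, hb2]
    simp [PySem.Set.mem_ofList]
  · rw [if_neg (fun h => hb2 ((inter_nonempty_iff _ _).mp h)),
        if_pos ((inter_nonempty_iff _ _).mpr hb1)]
    simp only [hb1, hb2]
    simp [PySem.Set.mem_ofList]
  · rw [if_pos ((inter_nonempty_iff _ _).mpr hb2),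
        if_neg (fun h => hb1 ((inter_nonempty_iff _ _).mp h))]
    simp only [hb1, hb2]
    simp [PySem.Set.mem_ofList]
  · rw [if_neg (fun h => hb2 ((inter_nonempty_iff _ _).mp h)),
        if_neg (fun h => hb1 ((inter_nonempty_iff _ _).mp h))]
    simp only [hb1, hb2]
    simp [PySem.Set.mem_ofList]
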